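-- pv_equiv track=rewrite | github.com/1933211129/speech | speech_ai/WoofWaf/payload_ai/feature_extractor.py | get_num_keywords
-- ===== SOURCE A (Python) =====
-- def get_num_keywords(payload: str) -> int:
--     """ Get SQL keyword count from payload
--         Parameters
--         ----------
--         self: FeatureExtractor instance
--         payload: Single sample
--
--         Returns
--         -------
--         Number of SQL keywords
--     """
--     keywords = ['select',
--                 'from',
--                 'where',
--                 'union',
--                 'sleep',
--                 'or',
--                 'and',
--                 'like',
--                 'order']
--     count = 0
--
--     word_list = payload.split()
--     for word in word_list:
--         if word.lower() in keywords:
--             count += 1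
--
--     return count
-- ===== SOURCE B (Python) =====
-- from collections import Counter
--
-- def get_num_keywords(payload: str) -> int:
--     keywords = ['select', 'from', 'where', 'union', 'sleep',
--                 'or', 'and', 'like', 'order']
--     counts = Counter(w.lower() for w in payload.split())
--     return sum(counts[k] for k in keywords)
-- ===== Notes on version B (the rewrite author's own statement) =====
-- stated objective: alternative
-- what changed: B builds a Counter of the lowercased words once and then sums the counts of the nine keywords, iterating over the fixed keyword list instead of scanning each payload word and testing list membership.
import Mathlib
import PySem

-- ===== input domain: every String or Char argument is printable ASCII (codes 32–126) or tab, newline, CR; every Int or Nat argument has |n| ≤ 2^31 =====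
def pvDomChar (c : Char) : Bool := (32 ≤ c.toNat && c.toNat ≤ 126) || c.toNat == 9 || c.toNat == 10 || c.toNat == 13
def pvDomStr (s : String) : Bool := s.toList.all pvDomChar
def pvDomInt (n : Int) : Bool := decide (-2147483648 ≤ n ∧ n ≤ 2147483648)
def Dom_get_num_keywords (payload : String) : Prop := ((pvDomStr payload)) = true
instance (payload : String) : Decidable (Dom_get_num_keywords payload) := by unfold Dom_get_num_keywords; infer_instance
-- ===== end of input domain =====

-- B builds a Counter of the lowercased words once and sums the counts of the nine keywords (same result, reshaped traversal).
-- ===== PORT A =====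
def pvKeywords : List String :=
  ["select", "from", "where", "union", "sleep", "or", "and", "like", "order"]

def get_num_keywords (payload : String) : Int :=
  let keywords := pvKeywords
  let word_list := PySem.Str.split₀ payload
  word_list.foldl (fun count word =>
    if PySem.Str.lower word ∈ keywords then count + 1 else count) 0

-- ===== PORT B =====
def get_num_keywords_alt (payload : String) : Int :=
  let keywords := pvKeywords
  let counts := PySem.Dict.counter ((PySem.Str.split₀ payload).map PySem.Str.lower)
  (keywords.map (fun k => counts.getD k 0)).sum

-- ===== PRECONDITION & SPEC =====
def Spec_get_num_keywords (payload : String) (out : Int) : Prop := out = get_num_keywords_alt payload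
instance (payload : String) (out : Int) : Decidable (Spec_get_num_keywords payload out) := by unfold Spec_get_num_keywords; infer_instance

-- ===== CLAIM (what is proved, stated in full; the proofs are below) =====
def Claim_equal_get_num_keywords : Prop := ∀ (payload : String), Dom_get_num_keywords payload → Spec_get_num_keywords payload (get_num_keywords payload)

-- ===== LEMMAS AND PROOFS =====

-- ===== VERDICT (by name: the statement is the Claim_ definition above) =====
-- Σ over a nodup list K of the indicator (x = k) is the membership indicator.
theorem pv_sum_indicator (x : String) (K : List String) (h : K.Nodup) :
    (K.map (fun k => (if x = k then (1:Int) else 0))).sum = if x ∈ K then 1 else 0 := by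
  induction K with
  | nil => simp
  | cons k K ih =>
    simp only [List.map_cons, List.sum_cons, List.nodup_cons] at *
    rcases h with ⟨hk, hK⟩
    by_cases hx : x = k
    · subst hx; simp [hk, ih hK]
    · simp [hx, ih hK]

-- Σ over nodup K of ws.count k equals countP (· ∈ K) ws.
theorem pv_sum_count (K : List String) (h : K.Nodup) (ws : List String) :
    (K.map (fun k => (ws.count k : Int))).sum = (ws.countP (fun w => decide (w ∈ K)) : Int) := by
  induction ws with
  | nil => simp
  | cons x ws ih =>
    have : (K.map (fun k => ((x :: ws).count k : Int))).sum
        = (K.map (fun k => (if x = k then (1:Int) else 0))).sum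
          + (K.map (fun k => (ws.count k : Int))).sum := by
      rw [← List.sum_map_add]
      refine congrArg List.sum (List.map_congr_left ?_)
      intro k _
      by_cases hx : x = k
      · subst hx; simp [List.count_cons_self]; omega
      · simp [List.count_cons_of_ne (by simpa using hx), hx]
    rw [this, pv_sum_indicator x K h, ih]
    by_cases hx : x ∈ K
    · simp [hx]; omega
    · simp [hx]

theorem get_num_keywords_spec : Claim_equal_get_num_keywords := by
  intro payload _
  unfold Spec_get_num_keywords get_num_keywords get_num_keywords_alt
  simp only []
  rw [PySem.List.foldl_ite_add_one]
  have hnd : pvKeywords.Nodup := by decide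
  rw [List.map_congr_left (fun k _ => PySem.Dict.getD_counter (xs := (PySem.Str.split₀ payload).map PySem.Str.lower) (v := k)),
      pv_sum_count _ hnd]
  simp only [List.countP_map, zero_add, Nat.cast_inj]
  exact List.countP_congr (fun a _ => Iff.rfl)
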